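-- pv_equiv track=rewrite | github.com/vincen-tho/Pyhton-Compiler | cyk.py | finiteAutomataVariable
-- ===== SOURCE A (Python) =====
-- def finiteAutomataVariable(s):
--     # Mengembalikan true jika s bagian dari variable
--     if len(s)<1:
--         return False
--     else:
--         validVar = ['A', 'B', 'C', 'D', 'E', 'F', 'G', 'H', 'I', 'J', 'K', 'L', 'M', 'N', 'O', 'P', 'Q', 'R', 'S', 'T', 'U', 'V', 'W', 'X', 'Y', 'Z', 'a', 'b', 'c', 'd', 'e', 'f', 'g', 'h', 'i', 'j', 'k', 'l', 'm', 'n', 'o', 'p', 'q', 'r', 's', 't', 'u', 'v', 'w', 'x', 'y', 'z', '_']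
--         numberArray = ['0', '1', '2', '3', '4', '5', '6', '7', '8', '9']
--         if s[0] not in validVar:
--             return False
--         else:
--             for i in s:
--                 if (i not in numberArray) and (i not in validVar):
--                     return False
--         return True
-- ===== SOURCE B (Python) =====
-- import re
--
-- _IDENT = re.compile(r'[A-Za-z_][A-Za-z0-9_]*')
--
-- def finiteAutomataVariable(s):
--     # Full-match the identifier regex: first char letter/underscore,
--     # remaining chars letters/digits/underscore; empty string never matches.
--     return bool(_IDENT.fullmatch(s))
-- ===== Notes on version B (the rewrite author's own statement) =====
-- stated objective: faster
-- what changed: Replaced the hand-rolled first-char check over a hardcoded 63-element character list plus a per-character list-membership loop with a single compiled regular-expression fullmatch of [A-Za-z_][A-Za-z0-9_]*, delegating the whole scan to the C regex engine (large constant-factor win).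
import Mathlib
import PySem

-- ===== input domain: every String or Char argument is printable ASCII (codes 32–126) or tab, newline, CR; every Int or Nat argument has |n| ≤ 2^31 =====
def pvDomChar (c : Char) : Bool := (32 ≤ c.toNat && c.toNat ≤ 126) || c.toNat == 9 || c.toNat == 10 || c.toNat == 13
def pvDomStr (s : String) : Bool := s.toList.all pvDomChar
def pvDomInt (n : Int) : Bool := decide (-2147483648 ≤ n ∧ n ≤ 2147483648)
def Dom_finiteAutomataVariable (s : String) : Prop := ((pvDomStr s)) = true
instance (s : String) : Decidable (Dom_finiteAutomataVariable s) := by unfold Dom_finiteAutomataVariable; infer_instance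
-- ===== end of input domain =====

-- B replaces A's hardcoded character-list membership checks and explicit loop with a single
-- regular-expression fullmatch of [A-Za-z_][A-Za-z0-9_]*; re.fullmatch is ported exactly as a
-- Brzozowski-derivative regex matcher applied to that pattern (more idiomatic, same results).

-- ===== PORT A =====
def pvValidVar : List Char :=
  ['A','B','C','D','E','F','G','H','I','J','K','L','M','N','O','P','Q','R','S','T','U','V','W','X','Y','Z',
   'a','b','c','d','e','f','g','h','i','j','k','l','m','n','o','p','q','r','s','t','u','v','w','x','y','z','_']
def pvNumberArray : List Char := ['0','1','2','3','4','5','6','7','8','9']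

-- the `for i in s` loop of A
def pvLoopA : List Char → Bool
  | [] => true
  | c :: rest =>
      if (!pvNumberArray.contains c) && (!pvValidVar.contains c) then false
      else pvLoopA rest

def finiteAutomataVariable (s : String) : Bool :=
  match s.toList with
  | [] => false            -- len(s) < 1
  | c :: _ =>
      if !pvValidVar.contains c then false    -- s[0] not in validVar
      else pvLoopA s.toList

-- ===== PORT B =====
-- Regex ASTs: character class given by ranges (as in the pattern's [..] classes); `cls []`
-- is the empty language.
inductive RE
  | eps : RE
  | cls : List (Char × Char) → RE
  | cat : RE → RE → RE
  | alt : RE → RE → RE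
  | star : RE → RE
deriving DecidableEq, Repr

def pvInClass (rs : List (Char × Char)) (c : Char) : Bool := rs.any (fun p => p.1 ≤ c && c ≤ p.2)

def pvNullable : RE → Bool
  | .eps => true
  | .cls _ => false
  | .cat a b => pvNullable a && pvNullable b
  | .alt a b => pvNullable a || pvNullable b
  | .star _ => true

-- smart constructors (keep derivatives small)
def pvCat (a b : RE) : RE :=
  if a = .cls [] then .cls [] else if a = .eps then b else .cat a b
def pvAlt (a b : RE) : RE :=
  if a = .cls [] then b else if b = .cls [] then a else .alt a b

def pvDeriv : RE → Char → RE
  | .eps, _ => .cls []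
  | .cls rs, c => if pvInClass rs c then .eps else .cls []
  | .cat a b, c =>
      if pvNullable a then pvAlt (pvCat (pvDeriv a c) b) (pvDeriv b c)
      else pvCat (pvDeriv a c) b
  | .alt a b, c => pvAlt (pvDeriv a c) (pvDeriv b c)
  | .star r, c => pvCat (pvDeriv r c) (.star r)

def pvFullmatch (r : RE) (l : List Char) : Bool := pvNullable (l.foldl pvDeriv r)

-- the compiled pattern  [A-Za-z_][A-Za-z0-9_]*
def pvFirstCls : List (Char × Char) := [('A','Z'),('a','z'),('_','_')]
def pvRestCls  : List (Char × Char) := [('A','Z'),('a','z'),('0','9'),('_','_')]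
def pvPattern : RE := .cat (.cls pvFirstCls) (.star (.cls pvRestCls))

def finiteAutomataVariable_alt (s : String) : Bool :=
  pvFullmatch pvPattern s.toList

-- ===== PRECONDITION & SPEC =====
def Spec_finiteAutomataVariable (s : String) (out : Bool) : Prop := out = finiteAutomataVariable_alt s
instance (s : String) (out : Bool) : Decidable (Spec_finiteAutomataVariable s out) := by unfold Spec_finiteAutomataVariable; infer_instance

-- ===== CLAIM (what is proved, stated in full; the proofs are below) =====
def Claim_equal_finiteAutomataVariable : Prop := ∀ (s : String), Dom_finiteAutomataVariable s → Spec_finiteAutomataVariable s (finiteAutomataVariable s)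

-- ===== LEMMAS AND PROOFS =====

lemma validVar_eq_first (c : Char) : pvValidVar.contains c = pvInClass pvFirstCls c := by
  rw [Bool.eq_iff_iff]
  simp only [pvValidVar, pvFirstCls, pvInClass, List.any_cons, List.any_nil,
    List.contains_cons, List.contains_nil,
    Bool.or_eq_true, Bool.and_eq_true, beq_iff_eq, decide_eq_true_eq,
    Bool.false_eq_true, or_false,
    Char.le_def, Char.ext_iff, UInt32.le_iff_toNat_le, ← UInt32.toNat_inj,
    show ('A').val.toNat = 65 from rfl, show ('B').val.toNat = 66 from rfl,
    show ('C').val.toNat = 67 from rfl, show ('D').val.toNat = 68 from rfl,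
    show ('E').val.toNat = 69 from rfl, show ('F').val.toNat = 70 from rfl,
    show ('G').val.toNat = 71 from rfl, show ('H').val.toNat = 72 from rfl,
    show ('I').val.toNat = 73 from rfl, show ('J').val.toNat = 74 from rfl,
    show ('K').val.toNat = 75 from rfl, show ('L').val.toNat = 76 from rfl,
    show ('M').val.toNat = 77 from rfl, show ('N').val.toNat = 78 from rfl,
    show ('O').val.toNat = 79 from rfl, show ('P').val.toNat = 80 from rfl,
    show ('Q').val.toNat = 81 from rfl, show ('R').val.toNat = 82 from rfl,
    show ('S').val.toNat = 83 from rfl, show ('T').val.toNat = 84 from rfl,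
    show ('U').val.toNat = 85 from rfl, show ('V').val.toNat = 86 from rfl,
    show ('W').val.toNat = 87 from rfl, show ('X').val.toNat = 88 from rfl,
    show ('Y').val.toNat = 89 from rfl, show ('Z').val.toNat = 90 from rfl,
    show ('a').val.toNat = 97 from rfl, show ('b').val.toNat = 98 from rfl,
    show ('c').val.toNat = 99 from rfl, show ('d').val.toNat = 100 from rfl,
    show ('e').val.toNat = 101 from rfl, show ('f').val.toNat = 102 from rfl,
    show ('g').val.toNat = 103 from rfl, show ('h').val.toNat = 104 from rfl,
    show ('i').val.toNat = 105 from rfl, show ('j').val.toNat = 106 from rfl,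
    show ('k').val.toNat = 107 from rfl, show ('l').val.toNat = 108 from rfl,
    show ('m').val.toNat = 109 from rfl, show ('n').val.toNat = 110 from rfl,
    show ('o').val.toNat = 111 from rfl, show ('p').val.toNat = 112 from rfl,
    show ('q').val.toNat = 113 from rfl, show ('r').val.toNat = 114 from rfl,
    show ('s').val.toNat = 115 from rfl, show ('t').val.toNat = 116 from rfl,
    show ('u').val.toNat = 117 from rfl, show ('v').val.toNat = 118 from rfl,
    show ('w').val.toNat = 119 from rfl, show ('x').val.toNat = 120 from rfl,
    show ('y').val.toNat = 121 from rfl, show ('z').val.toNat = 122 from rfl,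
    show ('_').val.toNat = 95 from rfl]
  omega

lemma numOrValid_eq_rest (c : Char) :
    (pvNumberArray.contains c || pvValidVar.contains c) = pvInClass pvRestCls c := by
  rw [Bool.eq_iff_iff]
  simp only [pvNumberArray, pvValidVar, pvRestCls, pvInClass, List.any_cons, List.any_nil,
    List.contains_cons, List.contains_nil,
    Bool.or_eq_true, Bool.and_eq_true, beq_iff_eq, decide_eq_true_eq,
    Bool.false_eq_true, or_false,
    Char.le_def, Char.ext_iff, UInt32.le_iff_toNat_le, ← UInt32.toNat_inj,
    show ('A').val.toNat = 65 from rfl, show ('B').val.toNat = 66 from rfl,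
    show ('C').val.toNat = 67 from rfl, show ('D').val.toNat = 68 from rfl,
    show ('E').val.toNat = 69 from rfl, show ('F').val.toNat = 70 from rfl,
    show ('G').val.toNat = 71 from rfl, show ('H').val.toNat = 72 from rfl,
    show ('I').val.toNat = 73 from rfl, show ('J').val.toNat = 74 from rfl,
    show ('K').val.toNat = 75 from rfl, show ('L').val.toNat = 76 from rfl,
    show ('M').val.toNat = 77 from rfl, show ('N').val.toNat = 78 from rfl,
    show ('O').val.toNat = 79 from rfl, show ('P').val.toNat = 80 from rfl,
    show ('Q').val.toNat = 81 from rfl, show ('R').val.toNat = 82 from rfl,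
    show ('S').val.toNat = 83 from rfl, show ('T').val.toNat = 84 from rfl,
    show ('U').val.toNat = 85 from rfl, show ('V').val.toNat = 86 from rfl,
    show ('W').val.toNat = 87 from rfl, show ('X').val.toNat = 88 from rfl,
    show ('Y').val.toNat = 89 from rfl, show ('Z').val.toNat = 90 from rfl,
    show ('a').val.toNat = 97 from rfl, show ('b').val.toNat = 98 from rfl,
    show ('c').val.toNat = 99 from rfl, show ('d').val.toNat = 100 from rfl,
    show ('e').val.toNat = 101 from rfl, show ('f').val.toNat = 102 from rfl,
    show ('g').val.toNat = 103 from rfl, show ('h').val.toNat = 104 from rfl,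
    show ('i').val.toNat = 105 from rfl, show ('j').val.toNat = 106 from rfl,
    show ('k').val.toNat = 107 from rfl, show ('l').val.toNat = 108 from rfl,
    show ('m').val.toNat = 109 from rfl, show ('n').val.toNat = 110 from rfl,
    show ('o').val.toNat = 111 from rfl, show ('p').val.toNat = 112 from rfl,
    show ('q').val.toNat = 113 from rfl, show ('r').val.toNat = 114 from rfl,
    show ('s').val.toNat = 115 from rfl, show ('t').val.toNat = 116 from rfl,
    show ('u').val.toNat = 117 from rfl, show ('v').val.toNat = 118 from rfl,
    show ('w').val.toNat = 119 from rfl, show ('x').val.toNat = 120 from rfl,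
    show ('y').val.toNat = 121 from rfl, show ('z').val.toNat = 122 from rfl,
    show ('_').val.toNat = 95 from rfl,
    show ('0').val.toNat = 48 from rfl, show ('1').val.toNat = 49 from rfl,
    show ('2').val.toNat = 50 from rfl, show ('3').val.toNat = 51 from rfl,
    show ('4').val.toNat = 52 from rfl, show ('5').val.toNat = 53 from rfl,
    show ('6').val.toNat = 54 from rfl, show ('7').val.toNat = 55 from rfl,
    show ('8').val.toNat = 56 from rfl, show ('9').val.toNat = 57 from rfl]
  omega

lemma loopA_eq_all (l : List Char) : pvLoopA l = l.all (pvInClass pvRestCls) := by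
  induction l with
  | nil => rfl
  | cons c rest ih =>
      rw [pvLoopA, List.all_cons, ← numOrValid_eq_rest c]
      by_cases hn : pvNumberArray.contains c <;> by_cases hv : pvValidVar.contains c <;>
        simp [ih]

lemma deriv_dead (c : Char) : pvDeriv (.cls []) c = .cls [] := by
  simp [pvDeriv, pvInClass]

lemma foldl_dead (l : List Char) : l.foldl pvDeriv (.cls []) = .cls [] := by
  induction l with
  | nil => rfl
  | cons c rest ih => simpa [deriv_dead] using ih

lemma deriv_star (c : Char) :
    pvDeriv (.star (.cls pvRestCls)) c =
      if pvInClass pvRestCls c then .star (.cls pvRestCls) else .cls [] := by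
  by_cases h : pvInClass pvRestCls c <;> simp [pvDeriv, pvCat, h]

lemma foldl_star (l : List Char) :
    pvNullable (l.foldl pvDeriv (.star (.cls pvRestCls))) = l.all (pvInClass pvRestCls) := by
  induction l with
  | nil => rfl
  | cons c rest ih =>
      rw [List.foldl_cons, deriv_star, List.all_cons]
      by_cases h : pvInClass pvRestCls c
      · simp [h, ih]
      · simp [h, foldl_dead, pvNullable]

lemma deriv_pattern (c : Char) :
    pvDeriv pvPattern c =
      if pvInClass pvFirstCls c then .star (.cls pvRestCls) else .cls [] := by
  by_cases h : pvInClass pvFirstCls c <;>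
    simp [pvPattern, pvDeriv, pvNullable, pvCat, h]

-- ===== VERDICT (by name: the statement is the Claim_ definition above) =====
theorem finiteAutomataVariable_spec : Claim_equal_finiteAutomataVariable := by
  intro s _
  unfold Spec_finiteAutomataVariable finiteAutomataVariable finiteAutomataVariable_alt pvFullmatch
  cases hl : s.toList with
  | nil => rfl
  | cons c rest =>
      show (if !pvValidVar.contains c then false else pvLoopA (c :: rest)) =
        pvNullable (List.foldl pvDeriv pvPattern (c :: rest))
      rw [List.foldl_cons, deriv_pattern]
      by_cases hf : pvInClass pvFirstCls c
      · have hv : pvValidVar.contains c = true := by rw [validVar_eq_first]; exact hf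
        rw [if_pos hf, foldl_star, pvLoopA, hv]
        simp only [Bool.not_true, Bool.and_false, Bool.false_eq_true, if_false]
        exact loopA_eq_all rest
      · have hv : pvValidVar.contains c = false := by
          rw [validVar_eq_first]; simpa using hf
        rw [if_neg hf, foldl_dead, hv]
        rfl
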